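-- pv_equiv track=rewrite | github.com/V-c-W/beecrowd-resolutions | 2316 - Autorama.py | autorama_ranking
-- ===== SOURCE A (Python) =====
-- def autorama_ranking(K, N, M, sensores):
--     carro_pos = {i: 0 for i in range(1, N + 1)}
--     carro_tempo = {i: 0 for i in range(1, N + 1)}
--     checagens = {i: 1 for i in range(1, N + 1)}
--
--     for tempo, (carro, checagem) in enumerate(sensores):
--         if checagem == checagens[carro]:
--             carro_pos[carro] += 1
--             checagens[carro] = (checagens[carro] % K) + 1
--             carro_tempo[carro] = tempo
--
--     sorted_carros = sorted(range(1, N + 1), key=lambda x: (-carro_pos[x], carro_tempo[x]))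
--
--     return sorted_carros
-- ===== SOURCE B (Python) =====
-- def autorama_ranking(K, N, M, sensores):
--     # Bucket the events per car (keeping the global time index), then replay each
--     # car's own timeline independently.
--     eventos = {c: [] for c in range(1, N + 1)}
--     for t, (c, ch) in enumerate(sensores):
--         eventos[c].append((t, ch))
--     passes = {}
--     last = {}
--     for c in range(1, N + 1):
--         exp, p, lt = 1, 0, 0
--         for t, ch in eventos[c]:
--             if ch == exp:
--                 exp = (exp % K) + 1
--                 p += 1
--                 lt = t
--         passes[c] = p
--         last[c] = lt
--     return sorted(range(1, N + 1), key=lambda x: (-passes[x], last[x]))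
-- ===== Notes on version B (the rewrite author's own statement) =====
-- stated objective: alternative
-- what changed: Instead of one chronological pass threading three per-car dicts through every event, B buckets the events by car in one pass (keeping their global time index) and then replays each car's own timeline independently with a local (expected, passes, last_time) state, sorting the cars by (-passes, last_time) as before.
import Mathlib
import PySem

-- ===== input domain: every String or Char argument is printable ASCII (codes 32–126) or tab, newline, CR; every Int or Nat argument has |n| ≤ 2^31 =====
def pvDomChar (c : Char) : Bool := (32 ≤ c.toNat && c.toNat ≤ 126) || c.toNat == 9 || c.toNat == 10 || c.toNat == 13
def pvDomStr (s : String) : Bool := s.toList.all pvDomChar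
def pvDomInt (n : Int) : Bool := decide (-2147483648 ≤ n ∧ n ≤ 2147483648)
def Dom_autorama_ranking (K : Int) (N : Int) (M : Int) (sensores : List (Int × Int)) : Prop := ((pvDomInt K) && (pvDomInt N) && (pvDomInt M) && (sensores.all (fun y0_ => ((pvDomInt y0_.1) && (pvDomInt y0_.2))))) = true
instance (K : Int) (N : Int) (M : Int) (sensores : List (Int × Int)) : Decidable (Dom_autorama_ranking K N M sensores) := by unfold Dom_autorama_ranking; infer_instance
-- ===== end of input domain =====

-- B buckets the sensor events per car (keeping global time indices) and replays each car's
-- timeline independently, instead of threading three per-car dicts through one chronological pass.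


-- ===== PORT A =====
-- the loop body of A: one sensor event (tempo, (carro, checagem)) updating the three dicts.
-- Python's checagens[carro]/carro_pos[carro]/… raise KeyError on a missing key; under Pre_
-- every carro is a key of all three dicts, so getD (defaults 1 / 0 / 0) is exact there.
def pvStepA (K : Int)
    (σ : PySem.Dict Int Int × PySem.Dict Int Int × PySem.Dict Int Int)
    (e : Int × Int × Int) :
    PySem.Dict Int Int × PySem.Dict Int Int × PySem.Dict Int Int :=
  if e.2.2 == σ.2.2.getD e.2.1 1 then
    (σ.1.insert e.2.1 (σ.1.getD e.2.1 0 + 1),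
     σ.2.1.insert e.2.1 e.1,
     σ.2.2.insert e.2.1 (PySem.Int.mod (σ.2.2.getD e.2.1 1) K + 1))
  else σ

def autorama_ranking (K : Int) (N : Int) (M : Int) (sensores : List (Int × Int)) : List Int :=
  let carro_pos : PySem.Dict Int Int :=
    (PySem.List.pyRange 1 (N + 1) 1).foldl (fun d i => d.insert i 0) PySem.Dict.empty
  let carro_tempo : PySem.Dict Int Int :=
    (PySem.List.pyRange 1 (N + 1) 1).foldl (fun d i => d.insert i 0) PySem.Dict.empty
  let checagens : PySem.Dict Int Int :=
    (PySem.List.pyRange 1 (N + 1) 1).foldl (fun d i => d.insert i 1) PySem.Dict.empty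
  let st := (PySem.List.enumerate sensores 0).foldl (pvStepA K)
    (carro_pos, carro_tempo, checagens)
  PySem.List.sorted2 (PySem.List.pyRange 1 (N + 1) 1)
    (fun x => -(st.1.getD x 0)) (fun x => st.2.1.getD x 0)

-- ===== PORT B =====
-- B's inner replay step on one (global_time, checagem) event, state (expected, passes, last_time)
def pvStep (K : Int) (s : Int × Int × Int) (e : Int × Int) : Int × Int × Int :=
  if e.2 == s.1 then (PySem.Int.mod s.1 K + 1, s.2.1 + 1, e.1) else s

def autorama_ranking_alt (K : Int) (N : Int) (M : Int) (sensores : List (Int × Int)) : List Int :=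
  -- eventos.setdefault(c, []).append((t, ch))  ==  modify c [] (· ++ [(t, ch)])
  let eventos : PySem.Dict Int (List (Int × Int)) :=
    (PySem.List.enumerate sensores 0).foldl
      (fun d e => d.modify e.2.1 [] (fun l => l ++ [(e.1, e.2.2)])) PySem.Dict.empty
  let res :=
    (PySem.List.pyRange 1 (N + 1) 1).foldl
      (fun (pl : PySem.Dict Int Int × PySem.Dict Int Int) c =>
        (pl.1.insert c ((eventos.getD c []).foldl (pvStep K) (1, 0, 0)).2.1,
         pl.2.insert c ((eventos.getD c []).foldl (pvStep K) (1, 0, 0)).2.2))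
      (PySem.Dict.empty, PySem.Dict.empty)
  -- passes[x]/last[x] have every x of the range as a key, so getD with default 0 is exact
  PySem.List.sorted2 (PySem.List.pyRange 1 (N + 1) 1)
    (fun x => -(res.1.getD x 0)) (fun x => res.2.getD x 0)

-- ===== PRECONDITION & SPEC =====
-- Pre_ excludes exactly the inputs where the Python A raises: an event whose car is outside
-- 1..N (KeyError), and K = 0 together with some event of checkpoint 1 (ZeroDivisionError).
def Pre_autorama_ranking (K : Int) (N : Int) (M : Int) (sensores : List (Int × Int)) : Prop :=
  (∀ p ∈ sensores, 1 ≤ p.1 ∧ p.1 ≤ N) ∧ (K = 0 → ∀ p ∈ sensores, p.2 ≠ 1)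
instance (K : Int) (N : Int) (M : Int) (sensores : List (Int × Int)) : Decidable (Pre_autorama_ranking K N M sensores) := by unfold Pre_autorama_ranking; infer_instance

def pvWitness_autorama_ranking : Int × Int × Int × (List (Int × Int)) :=
  (2, 2, 3, [(1, 1), (2, 1), (1, 2)])

def Spec_autorama_ranking (K : Int) (N : Int) (M : Int) (sensores : List (Int × Int)) (out : List Int) : Prop := out = autorama_ranking_alt K N M sensores
instance (K : Int) (N : Int) (M : Int) (sensores : List (Int × Int)) (out : List Int) : Decidable (Spec_autorama_ranking K N M sensores out) := by unfold Spec_autorama_ranking; infer_instance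

-- ===== CLAIM (what is proved, stated in full; the proofs are below) =====
def Claim_equal_autorama_ranking : Prop := ∀ (K : Int) (N : Int) (M : Int) (sensores : List (Int × Int)), Dom_autorama_ranking K N M sensores → Pre_autorama_ranking K N M sensores → Spec_autorama_ranking K N M sensores (autorama_ranking K N M sensores)

-- ===== LEMMAS AND PROOFS =====

-- a fold inserting a key-determined value: lookup afterwards
theorem pv_foldl_insert_getD (l : List Int) (f : Int → Int) (d : PySem.Dict Int Int)
    (x v : Int) :
    (l.foldl (fun d i => d.insert i (f i)) d).getD x v
      = if x ∈ l then f x else d.getD x v := by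
  induction l generalizing d with
  | nil => simp
  | cons i t ih =>
    simp only [List.foldl_cons, ih, List.mem_cons]
    by_cases hx : x ∈ t
    · simp [hx]
    · rw [if_neg hx, PySem.Dict.getD_insert]
      by_cases hxi : x = i
      · simp [hxi]
      · simp [hxi, hx]

-- bucketing fold of B: what each car's bucket holds
theorem pv_bucket_getD (l : List (Int × Int × Int)) (d : PySem.Dict Int (List (Int × Int)))
    (c : Int) :
    (l.foldl (fun d e => d.modify e.2.1 [] (fun l => l ++ [(e.1, e.2.2)])) d).getD c []
      = d.getD c [] ++ (l.filter (fun e => e.2.1 == c)).map (fun e => (e.1, e.2.2)) := by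
  induction l generalizing d with
  | nil => simp
  | cons e t ih =>
    simp only [List.foldl_cons, ih, List.filter_cons]
    by_cases h : e.2.1 = c
    · simp [h, PySem.Dict.getD_modify_self]
    · have h' : ¬ (c = e.2.1) := fun hc => h hc.symm
      simp [h, h', PySem.Dict.getD_modify]

-- A's chronological fold, observed at one car, is the per-car replay of that car's events
theorem pv_A_percar (K : Int) (l : List (Int × Int × Int))
    (pos tempo chk : PySem.Dict Int Int) (x : Int) :
    (let σ := l.foldl (pvStepA K) (pos, tempo, chk)
     ((σ.2.2.getD x 1, σ.1.getD x 0, σ.2.1.getD x 0) : Int × Int × Int))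
      = ((l.filter (fun e => e.2.1 == x)).map (fun e => (e.1, e.2.2))).foldl (pvStep K)
          (chk.getD x 1, pos.getD x 0, tempo.getD x 0) := by
  induction l generalizing pos tempo chk with
  | nil => simp
  | cons e t ih =>
    simp only [List.foldl_cons, List.filter_cons]
    by_cases hc : e.2.1 = x
    · subst hc
      simp only [beq_self_eq_true, if_true, List.map_cons, List.foldl_cons]
      by_cases hm : e.2.2 = chk.getD e.2.1 1
      · have hstep : pvStepA K (pos, tempo, chk) e =
            (pos.insert e.2.1 (pos.getD e.2.1 0 + 1),
             tempo.insert e.2.1 e.1,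
             chk.insert e.2.1 (PySem.Int.mod (chk.getD e.2.1 1) K + 1)) := by
          simp [pvStepA, hm]
        rw [hstep, ih]
        congr 1
        simp [pvStep, hm, PySem.Dict.getD_insert_self]
      · have hstep : pvStepA K (pos, tempo, chk) e = (pos, tempo, chk) := by
          simp [pvStepA, hm]
        rw [hstep, ih]
        congr 1
        simp [pvStep, hm]
    · have hne : (e.2.1 == x) = false := by simp [hc]
      have hb : ¬ (x = e.2.1) := fun h => hc h.symm
      simp only [hne, Bool.false_eq_true, if_false]
      by_cases hm : e.2.2 = chk.getD e.2.1 1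
      · have hstep : pvStepA K (pos, tempo, chk) e =
            (pos.insert e.2.1 (pos.getD e.2.1 0 + 1),
             tempo.insert e.2.1 e.1,
             chk.insert e.2.1 (PySem.Int.mod (chk.getD e.2.1 1) K + 1)) := by
          simp [pvStepA, hm]
        rw [hstep, ih]
        congr 1
        simp [PySem.Dict.getD_insert, hb]
      · have hstep : pvStepA K (pos, tempo, chk) e = (pos, tempo, chk) := by
          simp [pvStepA, hm]
        rw [hstep, ih]

-- B's range fold over a pair of dicts splits into two independent insert folds
theorem pv_pair_fold (l : List Int) (g1 g2 : Int → Int)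
    (d1 d2 : PySem.Dict Int Int) :
    l.foldl (fun (pl : PySem.Dict Int Int × PySem.Dict Int Int) c =>
        (pl.1.insert c (g1 c), pl.2.insert c (g2 c))) (d1, d2)
      = (l.foldl (fun d c => d.insert c (g1 c)) d1,
         l.foldl (fun d c => d.insert c (g2 c)) d2) := by
  induction l generalizing d1 d2 with
  | nil => rfl
  | cons c t ih => simp [List.foldl_cons, ih]

theorem autorama_ranking_spec_aux (K N M : Int) (sensores : List (Int × Int))
    (hpre : Pre_autorama_ranking K N M sensores) :
    autorama_ranking K N M sensores = autorama_ranking_alt K N M sensores := by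
  unfold autorama_ranking autorama_ranking_alt
  dsimp only []
  rw [pv_pair_fold]
  have hrun : ∀ x : Int,
      (let σ := (PySem.List.enumerate sensores 0).foldl (pvStepA K)
          ((PySem.List.pyRange 1 (N + 1) 1).foldl (fun d i => d.insert i 0) PySem.Dict.empty,
           (PySem.List.pyRange 1 (N + 1) 1).foldl (fun d i => d.insert i 0) PySem.Dict.empty,
           (PySem.List.pyRange 1 (N + 1) 1).foldl (fun d i => d.insert i 1) PySem.Dict.empty)
       ((σ.2.2.getD x 1, σ.1.getD x 0, σ.2.1.getD x 0) : Int × Int × Int))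
        = (((PySem.List.enumerate sensores 0).filter (fun e => e.2.1 == x)).map
            (fun e => (e.1, e.2.2))).foldl (pvStep K) (1, 0, 0) := by
    intro x
    rw [pv_A_percar]
    simp only [pv_foldl_insert_getD]
    split_ifs <;> simp
  have hout : ∀ x : Int, x ∉ PySem.List.pyRange 1 (N + 1) 1 →
      ((PySem.List.enumerate sensores 0).filter (fun e => e.2.1 == x)) = [] := by
    intro x hx
    rw [List.filter_eq_nil_iff]
    intro e he hbe
    have hmem : e.2 ∈ sensores := by
      rcases (PySem.List.mem_enumerate_iff _ _ _).1 he with ⟨k, hk, rfl⟩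
      exact List.getElem_mem hk
    have hb := hpre.1 e.2 hmem
    have hex : e.2.1 = x := by simpa using hbe
    exact hx ((PySem.List.mem_pyRange_one).2 (by omega))
  congr 1
  · funext x
    have h1 := congrArg (fun t : Int × Int × Int => t.2.1) (hrun x)
    simp only at h1
    by_cases hx : x ∈ PySem.List.pyRange 1 (N + 1) 1
    · rw [pv_foldl_insert_getD, if_pos hx, pv_bucket_getD, h1]
      simp
    · rw [pv_foldl_insert_getD, if_neg hx, h1, hout x hx]
      simp
  · funext x
    have h1 := congrArg (fun t : Int × Int × Int => t.2.2) (hrun x)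
    simp only at h1
    by_cases hx : x ∈ PySem.List.pyRange 1 (N + 1) 1
    · rw [pv_foldl_insert_getD, if_pos hx, pv_bucket_getD, h1]
      simp
    · rw [pv_foldl_insert_getD, if_neg hx, h1, hout x hx]
      simp

-- ===== VERDICT (by name: the statement is the Claim_ definition above) =====
theorem autorama_ranking_spec : Claim_equal_autorama_ranking := by
  intro K N M sensores _ hpre
  exact autorama_ranking_spec_aux K N M sensores hpre
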